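-- pv_equiv track=rewrite | github.com/riverstambaugh/Dissertation_Code | check_isomorphic.py | sort_by_class_length_shape
-- ===== SOURCE A (Python) =====
-- def sort_by_class_length_shape(pres_classes):
--     D = dict()
--
--     for cls in pres_classes.values():
--         for wrd in cls:
--
--             w_canon = tuple(canonical_form(wrd))
--
--             if (len(cls), len(wrd), w_canon) not in D.keys():
--                 D[(len(cls), len(wrd), w_canon)] = [wrd]
--
--             elif wrd not in D[(len(cls), len(wrd), w_canon)]:
--                 D[(len(cls), len(wrd), w_canon)].append(wrd)
--
--     sorted_keys = sorted(D.items())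
--     sorted_D = dict(sorted_keys)
--
--     return sorted_D
--
-- def canonical_form(w):
--
--     word_dict = dict()
--     result = []
--
--     for index, char in enumerate(w):
--         if char not in word_dict:
--             word_dict[char] = index
--         result.append(word_dict[char])
--
--     return result
-- ===== SOURCE B (Python) =====
-- def canonical_form(w):
--     return [w.index(c) for c in w]
--
-- def sort_by_class_length_shape(pres_classes):
--     pairs = [((len(cls), len(wrd), tuple(canonical_form(wrd))), wrd)
--              for cls in pres_classes.values() for wrd in cls]
--     keys = sorted({k for k, _ in pairs})
--     return {k: list(dict.fromkeys(w for k2, w in pairs if k2 == k)) for k in keys}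
-- ===== Notes on version B (the rewrite author's own statement) =====
-- stated objective: alternative
-- what changed: B never builds a grouping dict: it flattens classes into (key, word) pairs, sorts the SET of distinct keys, and for each sorted key builds its bucket by filtering the flat pair list and deduplicating with dict.fromkeys, trading A's incremental dict-then-sort-items for a per-key scan; canonical_form becomes a first-index map instead of an enumerate+dict loop.
import Mathlib
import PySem

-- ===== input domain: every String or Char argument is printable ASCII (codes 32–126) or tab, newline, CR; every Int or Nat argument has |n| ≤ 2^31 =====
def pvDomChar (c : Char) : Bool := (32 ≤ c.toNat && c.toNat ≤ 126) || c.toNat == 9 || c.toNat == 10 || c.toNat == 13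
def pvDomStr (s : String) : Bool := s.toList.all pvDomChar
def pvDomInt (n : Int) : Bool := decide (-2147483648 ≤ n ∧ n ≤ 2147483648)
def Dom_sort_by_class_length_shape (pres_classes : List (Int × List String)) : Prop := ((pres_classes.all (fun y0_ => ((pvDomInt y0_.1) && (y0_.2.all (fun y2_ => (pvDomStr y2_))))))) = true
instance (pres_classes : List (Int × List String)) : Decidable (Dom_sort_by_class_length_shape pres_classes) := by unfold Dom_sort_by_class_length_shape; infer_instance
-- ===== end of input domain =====

-- B never builds a grouping dict: it sorts the set of distinct keys and builds each bucket by a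
-- per-key filter of the flat (key, word) pair list (alternative decomposition, not faster).

-- Shared sort-key embedding: Python compares the key tuples (a, b, cs) lexicographically;
-- 'enc' embeds them order-preservingly into lexicographically ordered 'List Int'
-- (the first two positions are always present, so list-lex = tuple-lex). Exact because the
-- sorted keys are distinct, so nothing beyond the key ever decides the order.
def enc (k : Int × Int × List Int) : List Int := k.1 :: k.2.1 :: k.2.2

-- ===== PORT A =====
-- canonical_form: fold over enumerate(w) carrying (word_dict, result).
-- word_dict[char] is read only when the key is present, so getD's default is unreachable.
def canonical_form (w : List Char) : List Int :=
  ((PySem.List.enumerate w 0).foldl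
    (fun (st : PySem.Dict Char Int × List Int) ic =>
      let wd := if ¬ st.1.contains ic.2 then st.1.insert ic.2 ic.1 else st.1
      (wd, st.2 ++ [wd.getD ic.2 0]))
    (PySem.Dict.empty, [])).2

def sort_by_class_length_shape (pres_classes : List (Int × List String)) : List (Int × Int × List Int × List String) :=
  let D := ((PySem.Dict.ofList pres_classes).values).foldl
    (fun (D : PySem.Dict (Int × Int × List Int) (List String)) cls =>
      cls.foldl (fun D wrd =>
        let w_canon := canonical_form wrd.toList
        let k : Int × Int × List Int := ((cls.length : Int), PySem.Str.len wrd, w_canon)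
        if ¬ D.contains k then D.insert k [wrd]
        else if wrd ∉ D.getD k [] then D.insert k (D.getD k [] ++ [wrd])
        else D) D)
    PySem.Dict.empty
  -- sorted(D.items()) and re-flatten the key tuple into the returned quadruples
  (PySem.List.sorted D.items (fun p => enc p.1)).map (fun p => (p.1.1, p.1.2.1, p.1.2.2, p.2))

-- ===== PORT B =====
-- w.index(c) never raises: c is drawn from w itself, hence the .getD 0 is exact.
def canonical_form_alt (w : List Char) : List Int :=
  w.map (fun c => ((PySem.List.index? w c).getD 0 : Int))

def sort_by_class_length_shape_alt (pres_classes : List (Int × List String)) : List (Int × Int × List Int × List String) :=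
  let pairs := ((PySem.Dict.ofList pres_classes).values).flatMap (fun cls =>
    cls.map (fun wrd => ((((cls.length : Int), PySem.Str.len wrd, canonical_form_alt wrd.toList) : Int × Int × List Int), wrd)))
  -- sorted({k for k, _ in pairs})
  let keys := PySem.List.sorted (PySem.Set.ofList (pairs.map (·.1))) enc
  -- {k: list(dict.fromkeys(w for k2, w in pairs if k2 == k)) for k in keys}, flattened
  keys.map (fun k => (k.1, k.2.1, k.2.2,
    (PySem.Set.ofList ((pairs.filter (fun p => p.1 == k)).map (·.2)) : List String)))

-- ===== PRECONDITION & SPEC =====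
def Spec_sort_by_class_length_shape (pres_classes : List (Int × List String)) (out : List (Int × Int × List Int × List String)) : Prop := out = sort_by_class_length_shape_alt pres_classes
instance (pres_classes : List (Int × List String)) (out : List (Int × Int × List Int × List String)) : Decidable (Spec_sort_by_class_length_shape pres_classes out) := by unfold Spec_sort_by_class_length_shape; infer_instance

-- ===== CLAIM (what is proved, stated in full; the proofs are below) =====
def Claim_equal_sort_by_class_length_shape : Prop := ∀ (pres_classes : List (Int × List String)), Dom_sort_by_class_length_shape pres_classes → Spec_sort_by_class_length_shape pres_classes (sort_by_class_length_shape pres_classes)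

-- ===== LEMMAS AND PROOFS =====

-- the two canonical forms agree: both send each character to its first-occurrence index
theorem idxOf?_of_mem {w : List Char} {c : Char} (h : c ∈ w) :
    List.idxOf? c w = some (List.idxOf c w) := by
  induction w with
  | nil => simp at h
  | cons a t ih =>
    by_cases hac : a = c
    · subst hac; simp [List.idxOf?_cons]
    · simp only [List.mem_cons] at h
      have hct : c ∈ t := h.resolve_left (fun hh => hac hh.symm)
      simp [List.idxOf?_cons, beq_iff_eq, hac, ih hct]

theorem canonA_go (w : List Char) (suf : List Char) :
    ∀ (pre : List Char) (D : PySem.Dict Char Int) (res : List Int),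
    pre ++ suf = w →
    (∀ c, D.contains c = true ↔ c ∈ pre) →
    (∀ c, c ∈ pre → D.getD c 0 = ((List.idxOf c w : Nat) : Int)) →
    ((PySem.List.enumerate suf (pre.length : Int)).foldl
      (fun (st : PySem.Dict Char Int × List Int) ic =>
        let wd := if ¬ st.1.contains ic.2 then st.1.insert ic.2 ic.1 else st.1
        (wd, st.2 ++ [wd.getD ic.2 0]))
      (D, res)).2 = res ++ suf.map (fun c => ((List.idxOf c w : Nat) : Int)) := by
  induction suf with
  | nil => intro pre D res _ _ _; simp [PySem.List.enumerate]
  | cons c rest ih =>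
    intro pre D res hps hc hg
    have hcons : PySem.List.enumerate (c :: rest) (pre.length : Int)
        = ((pre.length : Int), c) :: PySem.List.enumerate rest ((pre.length : Int) + 1) := rfl
    have hlen : ((pre.length : Int) + 1) = (((pre ++ [c]).length : Nat) : Int) := by
      simp
    by_cases h : D.contains c = true
    · -- char already seen: dict unchanged
      have hcp : c ∈ pre := (hc c).mp h
      have hstep : ((PySem.List.enumerate (c :: rest) (pre.length : Int)).foldl
          (fun (st : PySem.Dict Char Int × List Int) ic =>
            let wd := if ¬ st.1.contains ic.2 then st.1.insert ic.2 ic.1 else st.1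
            (wd, st.2 ++ [wd.getD ic.2 0]))
          (D, res))
          = ((PySem.List.enumerate rest ((pre.length : Int) + 1)).foldl
            (fun (st : PySem.Dict Char Int × List Int) ic =>
              let wd := if ¬ st.1.contains ic.2 then st.1.insert ic.2 ic.1 else st.1
              (wd, st.2 ++ [wd.getD ic.2 0]))
            (D, res ++ [D.getD c 0])) := by
        rw [hcons]; simp [h]
      rw [hstep, hlen, ih (pre ++ [c]) D (res ++ [D.getD c 0])
        (by simpa using hps)
        (fun c' => by
          rw [hc c']
          constructor
          · intro hh; exact List.mem_append.mpr (Or.inl hh)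
          · intro hh
            rcases List.mem_append.mp hh with hh | hh
            · exact hh
            · simp at hh; subst hh; exact hcp)
        (fun c' hc' => hg c' (by
          rcases List.mem_append.mp hc' with hh | hh
          · exact hh
          · simp at hh; subst hh; exact hcp))]
      simp [hg c hcp]
    · -- new char: insert it at the current index, which is its first occurrence in w
      have hncp : c ∉ pre := fun hh => h ((hc c).mpr hh)
      have hidx : List.idxOf c w = pre.length := by
        rw [← hps, List.idxOf_append, if_neg hncp, List.idxOf_cons_self]
        omega
      have hstep : ((PySem.List.enumerate (c :: rest) (pre.length : Int)).foldl
          (fun (st : PySem.Dict Char Int × List Int) ic =>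
            let wd := if ¬ st.1.contains ic.2 then st.1.insert ic.2 ic.1 else st.1
            (wd, st.2 ++ [wd.getD ic.2 0]))
          (D, res))
          = ((PySem.List.enumerate rest ((pre.length : Int) + 1)).foldl
            (fun (st : PySem.Dict Char Int × List Int) ic =>
              let wd := if ¬ st.1.contains ic.2 then st.1.insert ic.2 ic.1 else st.1
              (wd, st.2 ++ [wd.getD ic.2 0]))
            (D.insert c (pre.length : Int),
             res ++ [(D.insert c (pre.length : Int)).getD c 0])) := by
        rw [hcons]; simp [h]
      rw [hstep, hlen, ih (pre ++ [c]) (D.insert c (pre.length : Int)) _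
        (by simpa using hps)
        (fun c' => by
          rw [PySem.Dict.contains_insert]
          simp only [Bool.or_eq_true, beq_iff_eq, hc c', List.mem_append, List.mem_singleton]
          tauto)
        (fun c' hc' => by
          rcases List.mem_append.mp hc' with hh | hh
          · have hne : c' ≠ c := fun he => hncp (he ▸ hh)
            rw [PySem.Dict.getD_insert_of_ne _ _ _ hne]
            exact hg c' hh
          · simp at hh; subst hh
            rw [PySem.Dict.getD_insert_self, hidx])]
      simp [PySem.Dict.getD_insert_self, hidx]

theorem canonical_eq (w : List Char) : canonical_form w = canonical_form_alt w := by
  have hA : canonical_form w = w.map (fun c => ((List.idxOf c w : Nat) : Int)) := by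
    have := canonA_go w w [] PySem.Dict.empty []
      (by simp) (by simp [PySem.Dict.contains_empty]) (by simp)
    simpa [canonical_form] using this
  have hB : canonical_form_alt w = w.map (fun c => ((List.idxOf c w : Nat) : Int)) := by
    unfold canonical_form_alt
    apply List.map_congr_left
    intro c hcw
    rw [PySem.List.index?_eq_idxOf?, idxOf?_of_mem hcw]
    simp
  rw [hA, hB]

-- proof-side names for A's loop shape
def stepA (d : PySem.Dict (Int × Int × List Int) (List String))
    (p : (Int × Int × List Int) × String) : PySem.Dict (Int × Int × List Int) (List String) :=
  if ¬ d.contains p.1 then d.insert p.1 [p.2]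
  else if p.2 ∉ d.getD p.1 [] then d.insert p.1 (d.getD p.1 [] ++ [p.2])
  else d

def keyA (cls : List String) (w : String) : Int × Int × List Int :=
  ((cls.length : Int), PySem.Str.len w, canonical_form w.toList)

def pairsOf (values : List (List String)) : List ((Int × Int × List Int) × String) :=
  values.flatMap (fun cls => cls.map (fun w => (keyA cls w, w)))

def wordsOf (L : List ((Int × Int × List Int) × String)) (k : Int × Int × List Int) : List String :=
  (L.filter (fun p => p.1 == k)).map (·.2)

theorem enc_injective : Function.Injective enc := by
  rintro ⟨a1, a2, a3⟩ ⟨b1, b2, b3⟩ h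
  simp only [enc, List.cons.injEq] at h
  simp [h.1, h.2.1, h.2.2]

theorem pairwise_lt_of_nodup_le {l : List (Int × Int × List Int)} (h1 : l.Nodup)
    (h2 : l.Pairwise (fun a b => enc a ≤ enc b)) : l.Pairwise (fun a b => enc a < enc b) := by
  refine (h1.and h2).imp ?_
  rintro a b ⟨hne, hle⟩
  exact lt_of_le_of_ne hle (fun he => hne (enc_injective he))

-- one step of A's build loop, seen through getD and keys
theorem stepA_getD (d : PySem.Dict (Int × Int × List Int) (List String))
    (p : (Int × Int × List Int) × String) (k : Int × Int × List Int) :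
    (stepA d p).getD k [] =
      if p.1 = k then PySem.Set.add (d.getD k []) p.2 else d.getD k [] := by
  unfold stepA
  by_cases hk : p.1 = k
  · subst hk
    by_cases h : d.contains p.1 = true
    · by_cases hm : p.2 ∈ d.getD p.1 []
      · simp [h, PySem.Set.add, hm]
      · simp [h, hm, PySem.Dict.getD_insert_self, PySem.Set.add]
    · have h' : d.contains p.1 = false := by simpa using h
      simp [h', PySem.Dict.getD_insert_self, PySem.Dict.getD_of_not_contains d [] h',
        PySem.Set.add]
  · have hk' : k ≠ p.1 := fun he => hk he.symm
    rw [if_neg hk]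
    split_ifs with h1 h2 <;> first | rfl | rw [PySem.Dict.getD_insert_of_ne _ _ _ hk']

theorem stepA_keys (d : PySem.Dict (Int × Int × List Int) (List String))
    (p : (Int × Int × List Int) × String) :
    (stepA d p).keys = PySem.Set.add d.keys p.1 := by
  unfold stepA PySem.Set.add
  by_cases h : d.contains p.1 = true
  · have hmem : p.1 ∈ d.keys := (PySem.Dict.contains_iff_mem_keys d p.1).mp h
    by_cases hm : p.2 ∈ d.getD p.1 []
    · simp [h, hm, hmem]
    · simp [h, hm, hmem, PySem.Dict.keys_insert_of_contains d _ h]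
  · have h' : d.contains p.1 = false := by simpa using h
    have hmem : p.1 ∉ d.keys := fun hm => h ((PySem.Dict.contains_iff_mem_keys d p.1).mpr hm)
    simp [h', hmem, PySem.Dict.keys_insert_of_not_contains d _ h']

theorem wordsOf_cons (p : (Int × Int × List Int) × String)
    (L : List ((Int × Int × List Int) × String)) (k : Int × Int × List Int) :
    wordsOf (p :: L) k = if p.1 = k then p.2 :: wordsOf L k else wordsOf L k := by
  by_cases hk : p.1 = k <;> simp [wordsOf, hk]

theorem build_getD : ∀ (L : List ((Int × Int × List Int) × String))
    (d : PySem.Dict (Int × Int × List Int) (List String)) (k : Int × Int × List Int),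
    (L.foldl stepA d).getD k [] = PySem.Set.update (d.getD k []) (wordsOf L k) := by
  intro L
  induction L with
  | nil => intro d k; rfl
  | cons p L ih =>
    intro d k
    rw [List.foldl_cons, ih, wordsOf_cons, stepA_getD]
    by_cases hk : p.1 = k
    · simp only [hk, if_pos]; rfl
    · simp only [if_neg hk]

theorem build_keys : ∀ (L : List ((Int × Int × List Int) × String))
    (d : PySem.Dict (Int × Int × List Int) (List String)),
    (L.foldl stepA d).keys = PySem.Set.update d.keys (L.map (·.1)) := by
  intro L
  induction L with
  | nil => intro d; rfl
  | cons p L ih =>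
    intro d
    rw [List.foldl_cons, ih, stepA_keys]
    rfl

-- the dict A's loop builds, characterised item by item
theorem buildItems (L : List ((Int × Int × List Int) × String)) :
    (L.foldl stepA PySem.Dict.empty).items =
      (PySem.Set.ofList (L.map (·.1))).map
        (fun k => (k, (PySem.Set.ofList (wordsOf L k) : List String))) := by
  have hkeys : (L.foldl stepA PySem.Dict.empty).keys = PySem.Set.ofList (L.map (·.1)) := by
    rw [build_keys]; rfl
  have hnd : (L.foldl stepA PySem.Dict.empty).keys.Nodup := by
    rw [hkeys]; exact PySem.Set.nodup_ofList _
  rw [PySem.Dict.items_eq_map_keys _ hnd [], hkeys]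
  apply List.map_congr_left
  intro k _
  rw [build_getD]
  simp [PySem.Dict.getD_empty]
  rfl

-- A's nested class/word loop is the flat loop over the (key, word) pairs
theorem buildA_eq : ∀ (values : List (List String))
    (d : PySem.Dict (Int × Int × List Int) (List String)),
    values.foldl (fun D cls =>
      cls.foldl (fun D wrd =>
        let w_canon := canonical_form wrd.toList
        let k : Int × Int × List Int := ((cls.length : Int), PySem.Str.len wrd, w_canon)
        if ¬ D.contains k then D.insert k [wrd]
        else if wrd ∉ D.getD k [] then D.insert k (D.getD k [] ++ [wrd])
        else D) D) d = (pairsOf values).foldl stepA d := by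
  intro values
  induction values with
  | nil => intro d; rfl
  | cons cls rest ih =>
    intro d
    rw [List.foldl_cons, ih]
    simp only [pairsOf, List.flatMap_cons, List.foldl_append]
    congr 1
    rw [List.foldl_map]
    rfl

-- the inferred DecidableLT on List Int is the LinearOrder one (instances are subsingletons)
theorem decLT_eq : (fun (a b : List Int) => a.decidableLT b) = (LinearOrder.toDecidableLT : DecidableLT (List Int)) := by
  funext a b
  exact Subsingleton.elim _ _

-- sorting a nodup-keyed item list by its key is sorting the keys
theorem sorted_map_fixed (ks : List (Int × Int × List Int)) (g : (Int × Int × List Int) → List String)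
    (h : ks.Nodup) :
    PySem.List.sorted (ks.map (fun k => (k, g k))) (fun p => enc p.1) =
      (PySem.List.sorted ks enc).map (fun k => (k, g k)) := by
  rw [decLT_eq]
  exact PySem.List.sorted_eq_of_perm_of_pairwise_lt _ _ _
    ((@PySem.List.sorted_perm _ _ _ LinearOrder.toDecidableLT ks enc false).map _)
    (by
      rw [List.pairwise_map]
      exact pairwise_lt_of_nodup_le
        (((@PySem.List.sorted_perm _ _ _ LinearOrder.toDecidableLT ks enc false).nodup_iff).mpr h)
        (PySem.List.sorted_pairwise ks enc))

-- ===== VERDICT (by name: the statement is the Claim_ definition above) =====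
theorem sort_by_class_length_shape_spec : Claim_equal_sort_by_class_length_shape := by
  intro pres _
  unfold Spec_sort_by_class_length_shape
  simp only [sort_by_class_length_shape, sort_by_class_length_shape_alt]
  rw [buildA_eq]
  -- B's pair list is A's pair list (the canonical forms agree)
  have hpairs : ((PySem.Dict.ofList pres).values).flatMap (fun cls =>
      cls.map (fun wrd => ((((cls.length : Int), PySem.Str.len wrd, canonical_form_alt wrd.toList) : Int × Int × List Int), wrd)))
      = pairsOf ((PySem.Dict.ofList pres).values) := by
    unfold pairsOf
    congr 1
    funext cls
    apply List.map_congr_left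
    intro w _
    simp [keyA, canonical_eq]
  rw [hpairs]
  set P := pairsOf ((PySem.Dict.ofList pres).values) with hP
  rw [buildItems, sorted_map_fixed _ _ (PySem.Set.nodup_ofList _), List.map_map]
  apply List.map_congr_left
  intro k _
  rfl
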